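-- pv_equiv track=rewrite | github.com/Kudito98/Codesignal-tasks | code-arcade/27-magicalWell/magicalWell.py | solution
-- ===== SOURCE A (Python) =====
-- def solution(a, b, n):
--     money = 0
--     while n != 0:
--         money = money + (a * b)
--         n -= 1
--         a += 1
--         b += 1
--     return money
-- ===== SOURCE B (Python) =====
-- def solution(a, b, n):
--     # closed form: sum_{k=0}^{n-1} (a+k)(b+k)
--     #            = n*a*b + (a+b)*sum k + sum k^2
--     return n * a * b + (a + b) * (n * (n - 1) // 2) + (n - 1) * n * (2 * n - 1) // 6
-- ===== Notes on version B (the rewrite author's own statement) =====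
-- stated objective: faster
-- what changed: Replaces the n-iteration accumulation loop by the closed-form polynomial n*a*b + (a+b)*n(n-1)/2 + (n-1)n(2n-1)/6.
import Mathlib
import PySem

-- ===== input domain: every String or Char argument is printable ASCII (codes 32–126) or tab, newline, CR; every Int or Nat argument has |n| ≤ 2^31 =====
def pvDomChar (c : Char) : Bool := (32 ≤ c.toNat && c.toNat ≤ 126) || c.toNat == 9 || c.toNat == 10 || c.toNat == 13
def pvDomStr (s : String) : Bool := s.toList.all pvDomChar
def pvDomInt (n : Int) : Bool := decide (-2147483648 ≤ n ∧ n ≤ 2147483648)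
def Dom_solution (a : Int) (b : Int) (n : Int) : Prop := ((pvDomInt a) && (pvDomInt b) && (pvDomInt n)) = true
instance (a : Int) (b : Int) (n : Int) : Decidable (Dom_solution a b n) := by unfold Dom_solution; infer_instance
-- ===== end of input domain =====

-- B replaces A's n-iteration accumulation loop by a closed-form polynomial (O(1)).

-- ===== PORT A =====
-- the while loop, fueled by n.toNat (with 0 ≤ n the loop runs exactly n times)
def solutionLoop : Nat → Int → Int → Int → Int
  | 0, _, _, money => money
  | k + 1, a, b, money => solutionLoop k (a + 1) (b + 1) (money + a * b)

def solution (a : Int) (b : Int) (n : Int) : Int :=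
  solutionLoop n.toNat a b 0

-- ===== PORT B =====
def solution_alt (a : Int) (b : Int) (n : Int) : Int :=
  n * a * b + (a + b) * PySem.Int.floordiv (n * (n - 1)) 2
    + PySem.Int.floordiv ((n - 1) * n * (2 * n - 1)) 6

-- ===== PRECONDITION & SPEC =====
-- A's while loop never terminates for n < 0 (n is only decremented), so Pre_ requires 0 ≤ n.
def Pre_solution (a : Int) (b : Int) (n : Int) : Prop := 0 ≤ n
instance (a : Int) (b : Int) (n : Int) : Decidable (Pre_solution a b n) := by unfold Pre_solution; infer_instance
def pvWitness_solution : Int × Int × Int := (2, 3, 4)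
def Spec_solution (a : Int) (b : Int) (n : Int) (out : Int) : Prop := out = solution_alt a b n
instance (a : Int) (b : Int) (n : Int) (out : Int) : Decidable (Spec_solution a b n out) := by unfold Spec_solution; infer_instance

-- ===== CLAIM (what is proved, stated in full; the proofs are below) =====
def Claim_equal_solution : Prop := ∀ (a : Int) (b : Int) (n : Int), Dom_solution a b n → Pre_solution a b n → Spec_solution a b n (solution a b n)

-- ===== LEMMAS AND PROOFS =====

-- loop characterisation: 6 * result is the polynomial (multiplied through to avoid division)
theorem solutionLoop_poly (k : Nat) : ∀ (a b m : Int),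
    6 * solutionLoop k a b m =
      6 * m + 6 * (k : Int) * a * b + 3 * (a + b) * ((k : Int) * ((k : Int) - 1))
        + ((k : Int) - 1) * (k : Int) * (2 * (k : Int) - 1) := by
  induction k with
  | zero => intro a b m; simp [solutionLoop]
  | succ k ih =>
    intro a b m
    have h := ih (a + 1) (b + 1) (m + a * b)
    simp only [solutionLoop]
    rw [h]
    push_cast
    ring

theorem two_dvd_mul_pred (n : Int) : 2 ∣ n * (n - 1) := by
  rcases Int.even_or_odd n with ⟨c, hc⟩ | ⟨c, hc⟩
  · exact ⟨c * (n - 1), by rw [hc]; ring⟩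
  · exact ⟨n * c, by rw [hc]; ring⟩

theorem six_dvd_sq_sum (n : Int) (hn : 0 ≤ n) : 6 ∣ (n - 1) * n * (2 * n - 1) := by
  -- 6 * Σ k² = (n-1)n(2n-1): witness is the loop with a = b = 0
  refine ⟨solutionLoop n.toNat 0 0 0, ?_⟩
  have h := solutionLoop_poly n.toNat 0 0 0
  rw [Int.toNat_of_nonneg hn] at h
  linarith [h]

theorem solution_spec' (a b n : Int) (hn : 0 ≤ n) : solution a b n = solution_alt a b n := by
  obtain ⟨t, ht⟩ := two_dvd_mul_pred n
  obtain ⟨u, hu⟩ := six_dvd_sq_sum n hn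
  have h2 : PySem.Int.floordiv (n * (n - 1)) 2 = t := by
    rw [ht, PySem.Int.floordiv_eq_ediv_of_pos (by norm_num)]
    exact Int.mul_ediv_cancel_left t (by norm_num)
  have h6 : PySem.Int.floordiv ((n - 1) * n * (2 * n - 1)) 6 = u := by
    rw [hu, PySem.Int.floordiv_eq_ediv_of_pos (by norm_num)]
    exact Int.mul_ediv_cancel_left u (by norm_num)
  have hp := solutionLoop_poly n.toNat a b 0
  rw [Int.toNat_of_nonneg hn] at hp
  unfold solution solution_alt
  rw [h2, h6]
  have e1 : 3 * (a + b) * (n * (n - 1)) = 6 * ((a + b) * t) := by rw [ht]; ring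
  rw [e1, hu] at hp
  linarith

-- ===== VERDICT (by name: the statement is the Claim_ definition above) =====
theorem solution_spec : Claim_equal_solution := by
  intro a b n _ hn
  exact solution_spec' a b n hn
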